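-- pv_equiv track=rewrite | github.com/msbharathurs/statlot-649 | statlot/engine/models/m4_structured_mc.py | _valid_structure
-- ===== SOURCE A (Python) =====
-- DECADES = [(1,9),(10,18),(19,27),(28,36),(37,45),(46,49)]
--
-- def _in_decade(n, lo, hi):
--     return lo <= n <= hi
--
-- def _valid_structure(combo):
--     s = sorted(combo)
--     # Sum range
--     if not (100 <= sum(s) <= 200):
--         return False
--     # Odd/even
--     odd = sum(1 for n in s if n % 2 != 0)
--     if not (2 <= odd <= 4):
--         return False
--     # Decades covered
--     decades_hit = sum(1 for lo,hi in DECADES if any(_in_decade(n,lo,hi) for n in s))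
--     if decades_hit < 3:
--         return False
--     # Consecutive pairs
--     gaps = [s[i+1]-s[i] for i in range(len(s)-1)]
--     consec = sum(1 for g in gaps if g == 1)
--     if consec > 2:
--         return False
--     return True
-- ===== SOURCE B (Python) =====
-- def _valid_structure(combo):
--     s = sorted(combo)
--     total = odd = consec = 0
--     decades = set()
--     prev = None
--     for n in s:
--         total += n
--         if n % 2 != 0:
--             odd += 1
--         if 1 <= n <= 49:
--             decades.add((n - 1) // 9)
--         if prev is not None and n - prev == 1:
--             consec += 1
--         prev = n
--     return 100 <= total <= 200 and 2 <= odd <= 4 and len(decades) >= 3 and consec <= 2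
-- ===== Notes on version B (the rewrite author's own statement) =====
-- stated objective: simpler
-- what changed: Replaced the DECADES table with its nested any-scan by direct arithmetic decade indexing ((n-1)//9 collected into a set for in-range numbers) and fused sum, odd count, decade set and consecutive-pair count into a single pass over the sorted combo tracking the previous element.
import Mathlib
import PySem

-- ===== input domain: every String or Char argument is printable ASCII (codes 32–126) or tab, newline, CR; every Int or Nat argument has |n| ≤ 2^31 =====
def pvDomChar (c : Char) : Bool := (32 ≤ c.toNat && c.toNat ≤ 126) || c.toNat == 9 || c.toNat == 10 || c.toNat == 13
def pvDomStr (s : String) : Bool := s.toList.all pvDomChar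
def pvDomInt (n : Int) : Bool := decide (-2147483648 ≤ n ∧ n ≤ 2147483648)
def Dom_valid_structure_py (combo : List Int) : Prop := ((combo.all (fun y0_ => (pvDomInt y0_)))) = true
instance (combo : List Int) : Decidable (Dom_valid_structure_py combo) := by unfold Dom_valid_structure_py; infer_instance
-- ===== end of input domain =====

-- B replaces A's DECADES table + nested any-scan by direct arithmetic decade indexing ((n-1)//9 into a set)
-- and folds all four statistics into one pass over the sorted combo (objective: simpler).

-- ===== PORT A =====
def decadesA : List (Int × Int) := [(1,9),(10,18),(19,27),(28,36),(37,45),(46,49)]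

def inDecadeA (n lo hi : Int) : Bool := decide (lo ≤ n ∧ n ≤ hi)

def valid_structure_py (combo : List Int) : Bool :=
  let s := PySem.List.sorted combo (fun x => x) false
  if ¬ (100 ≤ s.sum ∧ s.sum ≤ 200) then false
  else
    let odd := ((s.filter (fun n => PySem.Int.mod n 2 != 0)).map (fun _ => (1:Int))).sum
    if ¬ (2 ≤ odd ∧ odd ≤ 4) then false
    else
      let decadesHit := ((decadesA.filter (fun p => s.any (fun n => inDecadeA n p.1 p.2))).map (fun _ => (1:Int))).sum
      if decadesHit < 3 then false
      else
        -- indices i and i+1 are always in range, so the total pyGetD is exact here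
        let gaps := (PySem.List.pyRange 0 ((s.length : Int) - 1) 1).map
          (fun i => PySem.List.pyGetD s (i+1) 0 - PySem.List.pyGetD s i 0)
        let consec := ((gaps.filter (fun g => g == 1)).map (fun _ => (1:Int))).sum
        if consec > 2 then false else true

-- ===== PORT B =====
-- loop state: (total, odd, decades-set, consec, prev)
def altStep (st : Int × Int × PySem.Set Int × Int × Option Int) (n : Int) :
    Int × Int × PySem.Set Int × Int × Option Int :=
  let (total, odd, dec, consec, prev) := st
  (total + n,
   odd + (if PySem.Int.mod n 2 != 0 then 1 else 0),
   (if 1 ≤ n ∧ n ≤ 49 then PySem.Set.add dec (PySem.Int.floordiv (n-1) 9) else dec),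
   consec + (if (match prev with | some q => n - q == 1 | none => false) then 1 else 0),
   some n)

def valid_structure_py_alt (combo : List Int) : Bool :=
  let s := PySem.List.sorted combo (fun x => x) false
  let r := s.foldl altStep (0, 0, PySem.Set.empty, 0, none)
  decide (100 ≤ r.1 ∧ r.1 ≤ 200) && decide (2 ≤ r.2.1 ∧ r.2.1 ≤ 4) &&
    decide (3 ≤ PySem.Set.len r.2.2.1) && decide (r.2.2.2.1 ≤ 2)

-- ===== PRECONDITION & SPEC =====
def Spec_valid_structure_py (combo : List Int) (out : Bool) : Prop := out = valid_structure_py_alt combo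
instance (combo : List Int) (out : Bool) : Decidable (Spec_valid_structure_py combo out) := by unfold Spec_valid_structure_py; infer_instance

-- ===== CLAIM (what is proved, stated in full; the proofs are below) =====
def Claim_equal_valid_structure_py : Prop := ∀ (combo : List Int), Dom_valid_structure_py combo → Spec_valid_structure_py combo (valid_structure_py combo)

-- ===== LEMMAS AND PROOFS =====

-- the four statistics of B's single pass, named for the proof
def decSet (d : PySem.Set Int) (s : List Int) : PySem.Set Int :=
  s.foldl (fun d n => if 1 ≤ n ∧ n ≤ 49 then PySem.Set.add d (PySem.Int.floordiv (n-1) 9) else d) d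

def consecCnt : Option Int → List Int → Int
  | _, [] => 0
  | none, n :: ns => consecCnt (some n) ns
  | some q, n :: ns => (if n - q = 1 then 1 else 0) + consecCnt (some n) ns

def gapsOf : List Int → List Int
  | [] => []
  | [_] => []
  | a :: b :: t => (b - a) :: gapsOf (b :: t)

lemma alt_fold_total (s : List Int) : ∀ (t o : Int) (d : PySem.Set Int) (c : Int) (p : Option Int),
    (s.foldl altStep (t, o, d, c, p)).1 = t + s.sum := by
  induction s with
  | nil => intro t o d c p; simp
  | cons n ns ih =>
    intro t o d c p
    simp only [List.foldl_cons, altStep, List.sum_cons]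
    rw [ih]; ring

lemma alt_fold_odd (s : List Int) : ∀ (t o : Int) (d : PySem.Set Int) (c : Int) (p : Option Int),
    (s.foldl altStep (t, o, d, c, p)).2.1 = o + (s.countP (fun n => PySem.Int.mod n 2 != 0) : Int) := by
  induction s with
  | nil => intro t o d c p; simp
  | cons n ns ih =>
    intro t o d c p
    simp only [List.foldl_cons, altStep, List.countP_cons]
    rw [ih]
    by_cases h : (PySem.Int.mod n 2 != 0) = true <;> simp [h] <;> push_cast <;> ring

lemma alt_fold_dec (s : List Int) : ∀ (t o : Int) (d : PySem.Set Int) (c : Int) (p : Option Int),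
    (s.foldl altStep (t, o, d, c, p)).2.2.1 = decSet d s := by
  induction s with
  | nil => intro t o d c p; simp [decSet]
  | cons n ns ih =>
    intro t o d c p
    simp only [List.foldl_cons, altStep]
    rw [ih]; simp [decSet]

lemma alt_fold_consec (s : List Int) : ∀ (t o : Int) (d : PySem.Set Int) (c : Int) (p : Option Int),
    (s.foldl altStep (t, o, d, c, p)).2.2.2.1 = c + consecCnt p s := by
  induction s with
  | nil => intro t o d c p; simp [consecCnt]
  | cons n ns ih =>
    intro t o d c p
    simp only [List.foldl_cons, altStep]
    rw [ih]
    cases p with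
    | none => simp [consecCnt]
    | some q =>
      simp only [consecCnt]
      by_cases h : n - q = 1 <;> simp [h] <;> ring

lemma mem_decSet (s : List Int) : ∀ (d : PySem.Set Int) (m : Int),
    m ∈ decSet d s ↔ m ∈ d ∨ ∃ n ∈ s, (1 ≤ n ∧ n ≤ 49) ∧ PySem.Int.floordiv (n-1) 9 = m := by
  induction s with
  | nil => intro d m; simp [decSet]
  | cons n ns ih =>
    intro d m
    simp only [decSet, List.foldl_cons] at *
    by_cases h : 1 ≤ n ∧ n ≤ 49
    · simp only [if_pos h, ih, PySem.Set.mem_add, List.mem_cons]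
      constructor
      · rintro (⟨hm | hm⟩ | ⟨x, hx, hr, hi⟩)
        · exact Or.inl hm
        · exact Or.inr ⟨n, Or.inl rfl, h, hm.symm⟩
        · exact Or.inr ⟨x, Or.inr hx, hr, hi⟩
      · rintro (hm | ⟨x, (rfl | hx), hr, hi⟩)
        · exact Or.inl (Or.inl hm)
        · exact Or.inl (Or.inr hi.symm)
        · exact Or.inr ⟨x, hx, hr, hi⟩
    · simp only [if_neg h, ih, List.mem_cons]
      constructor
      · rintro (hm | ⟨x, hx, hr, hi⟩)
        · exact Or.inl hm
        · exact Or.inr ⟨x, Or.inr hx, hr, hi⟩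
      · rintro (hm | ⟨x, (rfl | hx), hr, hi⟩)
        · exact Or.inl hm
        · exact absurd hr h
        · exact Or.inr ⟨x, hx, hr, hi⟩

lemma nodup_decSet (s : List Int) : ∀ (d : PySem.Set Int), d.Nodup → (decSet d s).Nodup := by
  induction s with
  | nil => intro d hd; simpa [decSet] using hd
  | cons n ns ih =>
    intro d hd
    simp only [decSet, List.foldl_cons]
    by_cases h : 1 ≤ n ∧ n ≤ 49
    · simp only [if_pos h]; exact ih _ (PySem.Set.nodup_add _ _ hd)
    · simp only [if_neg h]; exact ih _ hd

lemma idx_range {n : Int} (h1 : 1 ≤ n) (h2 : n ≤ 49) :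
    PySem.Int.floordiv (n-1) 9 ∈ ([0,1,2,3,4,5] : List Int) := by
  rw [PySem.Int.floordiv_eq_ediv_of_pos (by norm_num)]
  simp only [List.mem_cons, List.not_mem_nil, or_false]
  omega

lemma length_eq_countP {α : Type} [DecidableEq α] {l u : List α}
    (hl : l.Nodup) (hu : u.Nodup) (hsub : ∀ x ∈ l, x ∈ u) :
    l.length = u.countP (fun x => decide (x ∈ l)) := by
  have hperm : (u.filter (fun x => decide (x ∈ l))).Perm l := by
    refine (List.perm_ext_iff_of_nodup (hu.filter _) hl).mpr ?_
    intro a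
    simp only [List.mem_filter, decide_eq_true_eq]
    exact ⟨fun h => h.2, fun h => ⟨hsub a h, h⟩⟩
  rw [← hperm.length_eq, List.countP_eq_length_filter]

lemma mem_D_iff_decade (s : List Int) (d lo hi : Int)
    (hch : ∀ n : Int, ((1 ≤ n ∧ n ≤ 49) ∧ PySem.Int.floordiv (n-1) 9 = d) ↔ (lo ≤ n ∧ n ≤ hi)) :
    (d ∈ decSet PySem.Set.empty s) ↔ ∃ n ∈ s, lo ≤ n ∧ n ≤ hi := by
  rw [mem_decSet]
  simp only [PySem.Set.empty, List.not_mem_nil, false_or]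
  constructor
  · rintro ⟨n, hn, hr, hi⟩; exact ⟨n, hn, (hch n).mp ⟨hr, hi⟩⟩
  · rintro ⟨n, hn, hb⟩; exact ⟨n, hn, (hch n).mpr hb⟩

lemma any_eq_mem_D (s : List Int) (d lo hi : Int)
    (hch : ∀ n : Int, ((1 ≤ n ∧ n ≤ 49) ∧ PySem.Int.floordiv (n-1) 9 = d) ↔ (lo ≤ n ∧ n ≤ hi)) :
    (s.any (fun n => inDecadeA n lo hi)) = decide (d ∈ decSet PySem.Set.empty s) := by
  rw [Bool.eq_iff_iff]
  simp only [List.any_eq_true, inDecadeA, decide_eq_true_eq]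
  rw [mem_D_iff_decade s d lo hi hch]

lemma len_decSet (s : List Int) :
    ((decSet PySem.Set.empty s).length : Int) =
      (decadesA.countP (fun p => s.any (fun n => inDecadeA n p.1 p.2)) : Int) := by
  have hnd : (decSet PySem.Set.empty s).Nodup := nodup_decSet s _ (by simp [PySem.Set.empty])
  have hsub : ∀ x ∈ decSet PySem.Set.empty s, x ∈ ([0,1,2,3,4,5] : List Int) := by
    intro x hx
    rcases (mem_decSet s _ x).mp hx with h | ⟨n, _, ⟨h1, h2⟩, rfl⟩
    · simp [PySem.Set.empty] at h
    · exact idx_range h1 h2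
  have hlen := length_eq_countP hnd (by decide) hsub
  have h0 := any_eq_mem_D s 0 1 9 (by
    intro n; rw [PySem.Int.floordiv_eq_ediv_of_pos (by norm_num)]; omega)
  have h1 := any_eq_mem_D s 1 10 18 (by
    intro n; rw [PySem.Int.floordiv_eq_ediv_of_pos (by norm_num)]; omega)
  have h2 := any_eq_mem_D s 2 19 27 (by
    intro n; rw [PySem.Int.floordiv_eq_ediv_of_pos (by norm_num)]; omega)
  have h3 := any_eq_mem_D s 3 28 36 (by
    intro n; rw [PySem.Int.floordiv_eq_ediv_of_pos (by norm_num)]; omega)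
  have h4 := any_eq_mem_D s 4 37 45 (by
    intro n; rw [PySem.Int.floordiv_eq_ediv_of_pos (by norm_num)]; omega)
  have h5 := any_eq_mem_D s 5 46 49 (by
    intro n; rw [PySem.Int.floordiv_eq_ediv_of_pos (by norm_num)]; omega)
  rw [hlen]
  simp only [decadesA, List.countP_cons, List.countP_nil, h0, h1, h2, h3, h4, h5,
    decide_eq_true_eq]

lemma gaps_nat (s : List Int) :
    (List.range (s.length - 1)).map (fun j => s.getD (j+1) 0 - s.getD j 0) = gapsOf s := by
  induction s with
  | nil => simp [gapsOf]
  | cons a tail ih =>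
    cases tail with
    | nil => simp [gapsOf]
    | cons b t =>
      have hlen : (a :: b :: t).length - 1 = t.length + 1 := by simp
      rw [hlen, List.range_succ_eq_map, List.map_cons, List.map_map]
      have htail : List.map ((fun j => (a :: b :: t).getD (j+1) 0 - (a :: b :: t).getD j 0) ∘ Nat.succ)
          (List.range t.length) = gapsOf (b :: t) := by
        rw [← ih]
        have hlen2 : (b :: t).length - 1 = t.length := by simp
        rw [hlen2]
        apply List.map_congr_left
        intro j _
        simp [Function.comp, Nat.succ_eq_add_one]
      rw [htail]
      simp [gapsOf]

lemma gaps_pyRange (s : List Int) :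
    (PySem.List.pyRange 0 ((s.length : Int) - 1) 1).map
      (fun i => PySem.List.pyGetD s (i+1) 0 - PySem.List.pyGetD s i 0) = gapsOf s := by
  cases s with
  | nil => rfl
  | cons a tail =>
    have hc : ((a :: tail).length : Int) - 1 = ((tail.length : Nat) : Int) := by
      simp
    rw [hc, PySem.List.pyRange_zero_natCast, List.map_map]
    rw [← gaps_nat (a :: tail)]
    have hlen : (a :: tail).length - 1 = tail.length := by simp
    rw [hlen]
    apply List.map_congr_left
    intro j _
    have hcast : ((j : Int) + 1) = ((j + 1 : Nat) : Int) := by push_cast; ring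
    simp only [Function.comp_apply]
    rw [hcast, PySem.List.pyGetD_natCast, PySem.List.pyGetD_natCast]

lemma consec_eq_gaps (s : List Int) :
    ((List.countP (fun g => g == 1) (gapsOf s)) : Int) = consecCnt none s := by
  cases s with
  | nil => simp [gapsOf, consecCnt]
  | cons a tail =>
    show _ = consecCnt (some a) tail
    induction tail generalizing a with
    | nil => simp [gapsOf, consecCnt]
    | cons b t ih =>
      simp only [gapsOf, List.countP_cons, consecCnt]
      rw [← ih b]
      by_cases h : b - a = 1 <;> simp [h] <;> push_cast <;> ring

lemma sum_ones_filter {α : Type} (l : List α) (p : α → Bool) :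
    ((l.filter p).map (fun _ => (1:Int))).sum = (l.countP p : Int) := by
  rw [PySem.List.sum_map_const_int, List.countP_eq_length_filter]; ring

lemma core_eq (s : List Int) :
    (if ¬ (100 ≤ s.sum ∧ s.sum ≤ 200) then false
     else
      let odd := ((s.filter (fun n => PySem.Int.mod n 2 != 0)).map (fun _ => (1:Int))).sum
      if ¬ (2 ≤ odd ∧ odd ≤ 4) then false
      else
        let decadesHit := ((decadesA.filter (fun p => s.any (fun n => inDecadeA n p.1 p.2))).map (fun _ => (1:Int))).sum
        if decadesHit < 3 then false
        else
          let gaps := (PySem.List.pyRange 0 ((s.length : Int) - 1) 1).map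
            (fun i => PySem.List.pyGetD s (i+1) 0 - PySem.List.pyGetD s i 0)
          let consec := ((gaps.filter (fun g => g == 1)).map (fun _ => (1:Int))).sum
          if consec > 2 then false else true) =
    (let r := s.foldl altStep (0, 0, PySem.Set.empty, 0, none)
     decide (100 ≤ r.1 ∧ r.1 ≤ 200) && decide (2 ≤ r.2.1 ∧ r.2.1 ≤ 4) &&
       decide (3 ≤ PySem.Set.len r.2.2.1) && decide (r.2.2.2.1 ≤ 2)) := by
  simp only [alt_fold_total, alt_fold_odd, alt_fold_dec, alt_fold_consec, zero_add]
  rw [gaps_pyRange]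
  rw [sum_ones_filter, sum_ones_filter, sum_ones_filter]
  rw [consec_eq_gaps, ← len_decSet]
  have hlen : PySem.Set.len (decSet PySem.Set.empty s) = ((decSet PySem.Set.empty s).length : Int) := rfl
  rw [hlen]
  rw [Bool.eq_iff_iff]
  simp only [Bool.and_eq_true, decide_eq_true_eq]
  split_ifs with h1 h2 h3 h4 <;>
    simp only [Bool.false_eq_true, false_iff, true_iff, not_and, not_le, not_lt] <;> omega

-- ===== VERDICT (by name: the statement is the Claim_ definition above) =====
theorem valid_structure_py_spec : Claim_equal_valid_structure_py := by
  intro combo _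
  unfold Spec_valid_structure_py valid_structure_py valid_structure_py_alt
  exact core_eq (PySem.List.sorted combo (fun x => x) false)
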